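-- pv_equiv track=rewrite | github.com/ConstantSun/relevant_component_analysis | svm.py | get_classes_list_point
-- ===== SOURCE A (Python) =====
-- def get_classes_list_point(train_x, train_y):
--     """
--     get claases list in trainset
--     """
--     classes_list_points_dict = {}
--     for (x, y) in zip(train_x, train_y):
--         if y not in classes_list_points_dict.keys():
--             classes_list_points_dict[y] = [x]
--         else:
--             classes_list_points_dict[y].append(x)
--
--     classes_list = []
--     for k in classes_list_points_dict.keys():
--         classes_list.append(classes_list_points_dict[k])
--
--     return classes_list
-- ===== SOURCE B (Python) =====
-- def get_classes_list_point(train_x, train_y):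
--     """
--     get claases list in trainset
--     """
--     pairs = list(zip(train_x, train_y))
--     labels = []
--     for _, y in pairs:
--         if y not in labels:
--             labels.append(y)
--     return [[x for (x, y) in pairs if y == lbl] for lbl in labels]
-- ===== Notes on version B (the rewrite author's own statement) =====
-- stated objective: simpler
-- what changed: Replaces the dict-of-lists accumulation plus a second keys loop by two plain passes: collect distinct labels in first-appearance order, then build each group with a filtering comprehension over the zipped pairs.
import Mathlib
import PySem

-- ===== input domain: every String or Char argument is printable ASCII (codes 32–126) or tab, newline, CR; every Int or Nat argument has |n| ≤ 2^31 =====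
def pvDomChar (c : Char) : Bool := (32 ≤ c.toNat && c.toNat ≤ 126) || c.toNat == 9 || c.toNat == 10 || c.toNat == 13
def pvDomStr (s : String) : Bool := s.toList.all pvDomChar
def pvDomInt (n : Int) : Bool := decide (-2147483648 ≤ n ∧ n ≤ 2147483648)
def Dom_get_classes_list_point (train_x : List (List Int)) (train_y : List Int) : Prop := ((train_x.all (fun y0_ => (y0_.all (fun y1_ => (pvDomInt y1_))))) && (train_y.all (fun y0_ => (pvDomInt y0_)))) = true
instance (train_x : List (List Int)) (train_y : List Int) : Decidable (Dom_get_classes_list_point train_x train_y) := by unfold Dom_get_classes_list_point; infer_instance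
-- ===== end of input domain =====

-- B replaces A's dict-of-lists accumulation (plus a second loop over its keys) by two plain passes:
-- distinct labels in first-appearance order, then one filtering pass per label; simpler, same results.


-- ===== PORT A =====
-- dict build: 'if y not in dict: dict[y] = [x] else: dict[y].append(x)'; second loop appends dict[k]
-- for each key k (k is present, so getD with default [] is exactly dict[k]).
def get_classes_list_point (train_x : List (List Int)) (train_y : List Int) : List (List (List Int)) :=
  let d := (train_x.zip train_y).foldl
    (fun d p =>
      if d.contains p.2 = false then d.insert p.2 [p.1]
      else d.insert p.2 (d.getD p.2 [] ++ [p.1]))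
    PySem.Dict.empty
  d.keys.foldl (fun acc k => acc ++ [d.getD k []]) []

-- ===== PORT B =====
def get_classes_list_point_alt (train_x : List (List Int)) (train_y : List Int) : List (List (List Int)) :=
  let pairs := train_x.zip train_y
  let labels := pairs.foldl (fun ls p => if p.2 ∈ ls then ls else ls ++ [p.2]) ([] : List Int)
  labels.map (fun l => (pairs.filter (fun p => p.2 == l)).map (fun p => p.1))

-- ===== PRECONDITION & SPEC =====
def Spec_get_classes_list_point (train_x : List (List Int)) (train_y : List Int) (out : List (List (List Int))) : Prop := out = get_classes_list_point_alt train_x train_y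
instance (train_x : List (List Int)) (train_y : List Int) (out : List (List (List Int))) : Decidable (Spec_get_classes_list_point train_x train_y out) := by unfold Spec_get_classes_list_point; infer_instance

-- ===== CLAIM (what is proved, stated in full; the proofs are below) =====
def Claim_equal_get_classes_list_point : Prop := ∀ (train_x : List (List Int)) (train_y : List Int), Dom_get_classes_list_point train_x train_y → Spec_get_classes_list_point train_x train_y (get_classes_list_point train_x train_y)

-- ===== LEMMAS AND PROOFS =====

-- A's two-branch dict step is exactly 'modify p.2 [] (· ++ [p.1])'.
theorem pv_stepA_eq_modify (d : PySem.Dict Int (List (List Int))) (p : List Int × Int) :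
    (if d.contains p.2 = false then d.insert p.2 [p.1]
     else d.insert p.2 (d.getD p.2 [] ++ [p.1]))
      = d.modify p.2 [] (fun v => v ++ [p.1]) := by
  by_cases h : d.contains p.2 = false
  · rw [PySem.Dict.modify, PySem.Dict.getD_of_not_contains d [] h]; simp [h]
  · simp [h, PySem.Dict.modify]

-- A's grouping fold, written with the keys in the first component, so the library lemma applies.
theorem pv_fold_eq_swapped (pairs : List (List Int × Int)) :
    pairs.foldl (fun d p => d.modify p.2 [] (fun v => v ++ [p.1])) PySem.Dict.empty
      = (pairs.map (fun p => (p.2, p.1))).foldl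
          (fun d p => d.modify p.1 [] (fun v => v ++ [p.2])) PySem.Dict.empty := by
  rw [List.foldl_map]

-- ===== VERDICT (by name: the statement is the Claim_ definition above) =====
theorem get_classes_list_point_spec : Claim_equal_get_classes_list_point := by
  unfold Claim_equal_get_classes_list_point
  intro train_x train_y _
  unfold Spec_get_classes_list_point get_classes_list_point get_classes_list_point_alt
  set pairs := train_x.zip train_y with hpairs
  have hstep : (fun (d : PySem.Dict Int (List (List Int))) (p : List Int × Int) =>
      if d.contains p.2 = false then d.insert p.2 [p.1]
      else d.insert p.2 (d.getD p.2 [] ++ [p.1]))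
      = (fun d p => d.modify p.2 [] (fun v => v ++ [p.1])) := by
    funext d p; exact pv_stepA_eq_modify d p
  simp only [hstep]
  rw [PySem.List.foldl_append_singleton_eq_map]
  rw [PySem.Dict.keys_foldl_modify_key pairs (fun p => p.2) [] (fun _ p v => v ++ [p.1])]
  have hlabels : pairs.foldl (fun ls p => if p.2 ∈ ls then ls else ls ++ [p.2]) ([] : List Int)
      = PySem.Set.update (PySem.Dict.empty : PySem.Dict Int (List (List Int))).keys
          (pairs.map (fun p => p.2)) := by
    rw [PySem.Set.update_map_eq_foldl_add]
    congr 1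
    funext ls p
    rw [PySem.Set.add_eq_ite]
  rw [← hlabels]
  simp only [List.nil_append]
  apply List.map_congr_left
  intro l _
  rw [pv_fold_eq_swapped, PySem.Dict.getD_foldl_modify_append]
  simp [List.filter_map, List.map_map, Function.comp_def]
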